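-- pv_equiv track=rewrite | github.com/yskang/AlgorithmPractice | baekjoon/python/emoji_17120.py | is_all_letter
-- ===== SOURCE A (Python) =====
-- def is_all_letter(content: str):
--     if content == '':
--         return False
--     res = True
--     for c in content:
--         if 48 <= ord(c) <= 57:
--             continue
--         elif 65 <= ord(c) <= 90:
--             continue
--         elif 97 <= ord(c) <= 122:
--             continue
--         elif c == '+' or c == '-' or c == '_':
--             continue
--         else:
--             return False
--     return res
-- ===== SOURCE B (Python) =====
-- import re
--
-- _TOKEN = re.compile(r'[0-9A-Za-z+\-_]+')
--
-- def is_all_letter(content: str):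
--     return _TOKEN.fullmatch(content) is not None
-- ===== Notes on version B (the rewrite author's own statement) =====
-- stated objective: idiomatic
-- what changed: Replaces the per-character branch-chain loop with a single precompiled regex fullmatch against the class [0-9A-Za-z+\-_]+, whose + quantifier also rejects the empty string.
import Mathlib
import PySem

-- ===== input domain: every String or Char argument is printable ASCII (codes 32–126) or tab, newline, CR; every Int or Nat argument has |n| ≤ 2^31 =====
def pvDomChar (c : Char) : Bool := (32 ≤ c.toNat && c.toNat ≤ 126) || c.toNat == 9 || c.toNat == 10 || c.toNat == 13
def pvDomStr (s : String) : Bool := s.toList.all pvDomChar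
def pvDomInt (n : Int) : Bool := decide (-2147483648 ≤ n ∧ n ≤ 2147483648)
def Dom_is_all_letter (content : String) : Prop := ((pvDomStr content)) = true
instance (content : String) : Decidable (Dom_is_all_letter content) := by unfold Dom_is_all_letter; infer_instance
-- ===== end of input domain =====

-- B replaces A's per-character branch-chain loop with a regex fullmatch (class [0-9A-Za-z+\-_]+); same behaviour, more idiomatic.
-- ===== PORT A =====
-- A: branch-chain loop with early return, transliterated as structural recursion over the chars.
def isAllLetterLoop : List Char → Bool
  | [] => true
  | c :: rest =>
    if 48 ≤ c.toNat ∧ c.toNat ≤ 57 then isAllLetterLoop rest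
    else if 65 ≤ c.toNat ∧ c.toNat ≤ 90 then isAllLetterLoop rest
    else if 97 ≤ c.toNat ∧ c.toNat ≤ 122 then isAllLetterLoop rest
    else if c = '+' ∨ c = '-' ∨ c = '_' then isAllLetterLoop rest
    else false

def is_all_letter (content : String) : Bool :=
  if content = "" then false else isAllLetterLoop content.toList

-- ===== PORT B =====
-- B: re.fullmatch(r'[0-9A-Za-z+\-_]+', content); the regex engine call is ported by its
-- semantics: a nonempty string each of whose characters is in the class.
def pvClassChar (c : Char) : Bool :=
  ('0' ≤ c && c ≤ '9') || ('A' ≤ c && c ≤ 'Z') || ('a' ≤ c && c ≤ 'z') ||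
  c == '+' || c == '-' || c == '_'

def is_all_letter_alt (content : String) : Bool :=
  !content.toList.isEmpty && content.toList.all pvClassChar

-- ===== PRECONDITION & SPEC =====
def Spec_is_all_letter (content : String) (out : Bool) : Prop := out = is_all_letter_alt content
instance (content : String) (out : Bool) : Decidable (Spec_is_all_letter content out) := by unfold Spec_is_all_letter; infer_instance

-- ===== CLAIM (what is proved, stated in full; the proofs are below) =====
def Claim_equal_is_all_letter : Prop := ∀ (content : String), Dom_is_all_letter content → Spec_is_all_letter content (is_all_letter content)

-- ===== LEMMAS AND PROOFS =====

-- ===== VERDICT (by name: the statement is the Claim_ definition above) =====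
theorem charle (a c : Char) : (a ≤ c) ↔ (a.toNat ≤ c.toNat) := by
  rw [Char.le_def, UInt32.le_iff_toNat_le]; rfl

theorem class_iff (c : Char) : pvClassChar c = true ↔
    ((48 ≤ c.toNat ∧ c.toNat ≤ 57) ∨ (65 ≤ c.toNat ∧ c.toNat ≤ 90) ∨
     (97 ≤ c.toNat ∧ c.toNat ≤ 122) ∨ (c = '+' ∨ c = '-' ∨ c = '_')) := by
  simp only [pvClassChar, Bool.or_eq_true, Bool.and_eq_true, decide_eq_true_eq, beq_iff_eq,
    charle, or_assoc,
    show ('0').toNat = 48 from rfl, show ('9').toNat = 57 from rfl,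
    show ('A').toNat = 65 from rfl, show ('Z').toNat = 90 from rfl,
    show ('a').toNat = 97 from rfl, show ('z').toNat = 122 from rfl]

theorem loop_eq (l : List Char) : isAllLetterLoop l = l.all pvClassChar := by
  induction l with
  | nil => rfl
  | cons c rest ih =>
    simp only [isAllLetterLoop, List.all_cons]
    split_ifs with h1 h2 h3 h4
    · rw [ih, (class_iff c).mpr (by tauto), Bool.true_and]
    · rw [ih, (class_iff c).mpr (by tauto), Bool.true_and]
    · rw [ih, (class_iff c).mpr (by tauto), Bool.true_and]
    · rw [ih, (class_iff c).mpr (by tauto), Bool.true_and]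
    · have : pvClassChar c = false := by
        rw [Bool.eq_false_iff]; intro h; rcases (class_iff c).mp h with h|h|h|h <;> tauto
      rw [this, Bool.false_and]

theorem is_all_letter_spec : Claim_equal_is_all_letter := by
  intro content _
  unfold Spec_is_all_letter is_all_letter is_all_letter_alt
  rw [loop_eq]
  by_cases h : content = ""
  · simp [h]
  · have hne : content.toList ≠ [] := fun hl => h (String.toList_eq_nil_iff.mp hl)
    simp [h, hne]
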